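-- pv_equiv track=rewrite | github.com/cynPTK/Intro_Computational_and_Systems | Homework2/CDB.py | SeqtoTransl
-- ===== SOURCE A (Python) =====
-- def SeqtoTransl (Myseq, MyDict):
--     TList = []
--     seq = ""
--     index = -1
--
--     for base in Myseq.upper():
--         seq += base
--         index += 1
--         if "ATG" in seq:
--             seq = ""
--             TList.append(Myseq[(index - 2):].upper())
--     return TList
-- ===== SOURCE B (Python) =====
-- def SeqtoTransl(Myseq, MyDict):
--     u = Myseq.upper()
--     out = []
--     a = ""
--     b = ""
--     for i, c in enumerate(u):
--         if a == "A" and b == "T" and c == "G":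
--             out.append(u[i - 2:])
--             a = ""
--             b = ""
--         else:
--             a = b
--             b = c
--     return out
-- ===== Notes on version B (the rewrite author's own statement) =====
-- stated objective: faster
-- what changed: Replaces the growing buffer with an 'ATG' substring scan at every character by a single pass that tracks only the last two characters (reset after each hit), appending the suffix of the pre-uppercased string.
import Mathlib
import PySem

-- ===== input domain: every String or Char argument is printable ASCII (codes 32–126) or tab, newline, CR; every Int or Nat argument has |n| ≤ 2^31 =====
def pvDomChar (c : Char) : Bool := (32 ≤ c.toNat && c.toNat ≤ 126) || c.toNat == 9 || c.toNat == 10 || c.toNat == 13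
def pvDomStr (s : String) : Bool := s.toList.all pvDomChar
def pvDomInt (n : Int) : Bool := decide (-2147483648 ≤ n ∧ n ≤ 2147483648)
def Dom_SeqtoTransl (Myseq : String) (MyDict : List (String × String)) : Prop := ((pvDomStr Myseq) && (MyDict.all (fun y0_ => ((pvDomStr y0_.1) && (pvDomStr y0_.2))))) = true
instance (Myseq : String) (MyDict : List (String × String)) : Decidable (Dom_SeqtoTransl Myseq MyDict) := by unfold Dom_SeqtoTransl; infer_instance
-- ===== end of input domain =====

-- B replaces A's growing buffer (scanned for "ATG" after every character) by a single pass
-- that tracks only the last two characters; an asymptotic speed-up, same return value.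

-- ===== PORT A =====
-- A's 'seq' (a Python str built by +=) is carried as a List Char; "ATG" in seq is PySem.Chars.isIn.
def SeqtoTransl (Myseq : String) (MyDict : List (String × String)) : List String :=
  let st := (PySem.Str.upper Myseq).toList.foldl
    (fun (s : List String × List Char × Int) base =>
      let seq := s.2.1 ++ [base]
      let index := s.2.2 + 1
      if PySem.Chars.isIn ['A', 'T', 'G'] seq then
        (s.1 ++ [PySem.Str.upper (PySem.Str.slice Myseq (some (index - 2)) none)], ([] : List Char), index)
      else
        (s.1, seq, index))
    ([], [], -1)
  st.1

-- ===== PORT B =====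
-- Source B's a/b ('' or a one-character string) are carried as List Char ([] or a singleton).
def SeqtoTransl_alt (Myseq : String) (MyDict : List (String × String)) : List String :=
  let u := PySem.Str.upper Myseq
  let st := (PySem.List.enumerate u.toList 0).foldl
    (fun (s : List String × List Char × List Char) (p : Int × Char) =>
      if s.2.1 = ['A'] ∧ s.2.2 = ['T'] ∧ p.2 = 'G' then
        (s.1 ++ [PySem.Str.slice u (some (p.1 - 2)) none], ([] : List Char), ([] : List Char))
      else
        (s.1, s.2.2, [p.2]))
    ([], [], [])
  st.1

-- ===== PRECONDITION & SPEC =====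
def Spec_SeqtoTransl (Myseq : String) (MyDict : List (String × String)) (out : List String) : Prop := out = SeqtoTransl_alt Myseq MyDict
instance (Myseq : String) (MyDict : List (String × String)) (out : List String) : Decidable (Spec_SeqtoTransl Myseq MyDict out) := by unfold Spec_SeqtoTransl; infer_instance

-- ===== CLAIM (what is proved, stated in full; the proofs are below) =====
def Claim_equal_SeqtoTransl : Prop := ∀ (Myseq : String) (MyDict : List (String × String)), Dom_SeqtoTransl Myseq MyDict → Spec_SeqtoTransl Myseq MyDict (SeqtoTransl Myseq MyDict)

-- ===== LEMMAS AND PROOFS =====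

-- The last two characters of A's buffer, in B's representation ([] = "no character yet").
def pvLastTwo (s : List Char) : List Char × List Char :=
  match s.reverse with
  | [] => ([], [])
  | [z] => ([], [z])
  | z :: y :: _ => ([y], [z])

theorem pvLastTwo_append (s : List Char) (c : Char) :
    pvLastTwo (s ++ [c]) = ((pvLastTwo s).2, [c]) := by
  unfold pvLastTwo
  rw [List.reverse_append]
  rcases h : s.reverse with _ | ⟨z, _ | ⟨y, r⟩⟩ <;> simp

-- upper is character-wise, so it commutes with a suffix slice.
theorem pvUpper_slice (s : String) (a : Int) :
    PySem.Str.upper (PySem.Str.slice s (some a) none) =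
      PySem.Str.slice (PySem.Str.upper s) (some a) none := by
  apply String.toList_inj.mp
  simp [PySem.Str.toList_upper, PySem.Str.toList_slice, PySem.Chars.slice_eq_listSlice,
    PySem.List.slice_some_none, PySem.Chars.upper, List.map_drop]

-- When the buffer contains no "ATG" yet, appending c creates one iff the buffer ends
-- with "AT" and c = 'G'.
theorem pvAtg_iff (s : List Char) (c : Char) (h : ¬ (['A', 'T', 'G'] <:+: s)) :
    (['A', 'T', 'G'] <:+: (s ++ [c])) ↔
      ((pvLastTwo s).1 = ['A'] ∧ (pvLastTwo s).2 = ['T'] ∧ c = 'G') := by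
  constructor
  · rintro ⟨pre, post, hps⟩
    rcases post.eq_nil_or_concat with rfl | ⟨q, d, rfl⟩
    · have h2 : (pre ++ ['A', 'T']) ++ ['G'] = s ++ [c] := by simpa using hps
      have h3 : pre ++ ['A', 'T'] = s ∧ ['G'] = [c] :=
        List.append_inj' h2 rfl
      obtain ⟨hs, hc⟩ := h3
      refine ⟨?_, ?_, by simpa using hc.symm⟩ <;>
      · unfold pvLastTwo
        rw [← hs, List.reverse_append]
        simp
    · exfalso
      apply h
      have h2 : (pre ++ ['A', 'T', 'G'] ++ q) ++ [d] = s ++ [c] := by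
        simpa [List.append_assoc] using hps
      have h3 : pre ++ ['A', 'T', 'G'] ++ q = s := (List.append_inj' h2 rfl).1
      exact ⟨pre, q, h3⟩
  · rintro ⟨h1, h2, rfl⟩
    unfold pvLastTwo at h1 h2
    rcases hr : s.reverse with _ | ⟨z, _ | ⟨y, r⟩⟩ <;> rw [hr] at h1 h2 <;>
      simp at h1 h2
    have hs : s = r.reverse ++ ['A', 'T'] := by
      have := congrArg List.reverse hr
      simpa [h1, h2] using this
    exact ⟨r.reverse, [], by simp [hs]⟩

-- The two loops, generalized: same accumulator, A's buffer contains no "ATG",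
-- B carries exactly the last two characters of A's buffer.
theorem pvLoop_eq (fA fB : Int → String) (hf : ∀ i, fA i = fB i) :
    ∀ (l : List Char) (k : Int) (acc : List String) (seq : List Char),
      ¬ (['A', 'T', 'G'] <:+: seq) →
      (l.foldl
        (fun (s : List String × List Char × Int) base =>
          let seq := s.2.1 ++ [base]
          let index := s.2.2 + 1
          if PySem.Chars.isIn ['A', 'T', 'G'] seq then
            (s.1 ++ [fA (index - 2)], ([] : List Char), index)
          else
            (s.1, seq, index))
        (acc, seq, k - 1)).1
      =
      ((PySem.List.enumerate l k).foldl
        (fun (s : List String × List Char × List Char) (p : Int × Char) =>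
          if s.2.1 = ['A'] ∧ s.2.2 = ['T'] ∧ p.2 = 'G' then
            (s.1 ++ [fB (p.1 - 2)], ([] : List Char), ([] : List Char))
          else
            (s.1, s.2.2, [p.2]))
        (acc, pvLastTwo seq)).1 := by
  intro l
  induction l with
  | nil => intro k acc seq _; simp [PySem.List.enumerate_nil]
  | cons base rest ih =>
    intro k acc seq hno
    rw [PySem.List.enumerate_cons]
    simp only [List.foldl_cons, sub_add_cancel]
    have hcond : PySem.Chars.isIn ['A', 'T', 'G'] (seq ++ [base]) = true ↔
        ((pvLastTwo seq).1 = ['A'] ∧ (pvLastTwo seq).2 = ['T'] ∧ base = 'G') := by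
      rw [PySem.Chars.isIn_iff_infix]
      exact pvAtg_iff seq base hno
    by_cases hc : (pvLastTwo seq).1 = ['A'] ∧ (pvLastTwo seq).2 = ['T'] ∧ base = 'G'
    · rw [if_pos (hcond.mpr hc), if_pos hc, hf (k - 2)]
      have h := ih (k + 1) (acc ++ [fB (k - 2)]) [] (by simp)
      simp only [add_sub_cancel_right, pvLastTwo, List.reverse_nil] at h
      exact h
    · rw [if_neg (by rw [hcond]; exact hc), if_neg hc]
      have hno' : ¬ (['A', 'T', 'G'] <:+: (seq ++ [base])) := by
        intro hi
        exact hc ((pvAtg_iff seq base hno).mp hi)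
      have h := ih (k + 1) acc (seq ++ [base]) hno'
      simp only [add_sub_cancel_right, pvLastTwo_append] at h
      exact h

-- ===== VERDICT (by name: the statement is the Claim_ definition above) =====
theorem SeqtoTransl_spec : Claim_equal_SeqtoTransl := by
  intro Myseq MyDict _
  unfold Spec_SeqtoTransl SeqtoTransl SeqtoTransl_alt
  have h := pvLoop_eq
      (fun i => PySem.Str.upper (PySem.Str.slice Myseq (some i) none))
      (fun i => PySem.Str.slice (PySem.Str.upper Myseq) (some i) none)
      (fun i => pvUpper_slice Myseq i)
      (PySem.Str.upper Myseq).toList 0 [] [] (by simp)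
  simpa [pvLastTwo] using h
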